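-- pv_equiv track=rewrite | github.com/algebrabool472-cpu/Proyecto | procesador.py | ascii_a_texto
-- ===== SOURCE A (Python) =====
-- def ascii_a_texto(ascii_str):
--     try:
--         nums = ascii_str.split()
--         for n in nums:
--             val = int(n)
--             if val < 0 or val > 127:
--                 return "Error: los códigos ASCII deben estar entre 0 y 127."
--         return ''.join(chr(int(n)) for n in nums)
--     except ValueError:
--         return "Error: la cadena ASCII debe contener solo números separados por espacios."
-- ===== SOURCE B (Python) =====
-- def ascii_a_texto(ascii_str):
--     acc = []
--     try:
--         for n in ascii_str.split():
--             val = int(n)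
--             if val < 0 or val > 127:
--                 return "Error: los códigos ASCII deben estar entre 0 y 127."
--             acc.append(chr(val))
--     except ValueError:
--         return "Error: la cadena ASCII debe contener solo números separados por espacios."
--     return ''.join(acc)
-- ===== Notes on version B (the rewrite author's own statement) =====
-- stated objective: simpler
-- what changed: B fuses A's two passes (validate-all, then re-parse every token again for the join) into one left-to-right pass that parses each token once, range-checks it and appends chr(val) to an accumulator.
import Mathlib
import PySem

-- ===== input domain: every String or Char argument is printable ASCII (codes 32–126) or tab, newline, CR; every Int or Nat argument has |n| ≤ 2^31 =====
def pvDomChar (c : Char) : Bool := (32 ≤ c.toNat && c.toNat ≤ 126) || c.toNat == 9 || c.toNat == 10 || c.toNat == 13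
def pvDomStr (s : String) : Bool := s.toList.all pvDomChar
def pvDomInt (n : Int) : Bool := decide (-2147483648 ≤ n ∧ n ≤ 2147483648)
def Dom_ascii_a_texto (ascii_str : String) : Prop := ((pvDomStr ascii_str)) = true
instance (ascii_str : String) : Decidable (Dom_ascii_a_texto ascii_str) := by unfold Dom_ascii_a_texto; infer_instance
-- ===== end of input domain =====

-- B fuses A's two passes (range-check loop, then a re-parsing join) into one pass that
-- parses each token once and accumulates characters; objective: simpler (same cost class).


def pvFmtErr : String := "Error: la cadena ASCII debe contener solo números separados por espacios."
def pvRangeErr : String := "Error: los códigos ASCII deben estar entre 0 y 127."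

-- ===== PORT A =====
-- A's first loop: `.error ()` models an uncaught ValueError (int(n) fails),
-- `.ok (some e)` an early `return e`, `.ok none` normal fall-through.
def asciiAFor : List String → Except Unit (Option String)
  | [] => .ok none
  | n :: rest =>
    match PySem.Int.ofStr? n with
    | none => .error ()
    | some val =>
      if val < 0 ∨ val > 127 then .ok (some pvRangeErr) else asciiAFor rest

-- A's join: ''.join(chr(int(n)) for n in nums); `none` models a ValueError inside the generator.
def asciiAJoin : List String → Option (List Char)
  | [] => some []
  | n :: rest =>
    match PySem.Int.ofStr? n with
    | none => none
    | some v => (asciiAJoin rest).map (fun cs => Char.ofNat v.toNat :: cs)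

def ascii_a_texto (ascii_str : String) : String :=
  let nums := PySem.Str.split₀ ascii_str
  match asciiAFor nums with
  | .error () => pvFmtErr
  | .ok (some e) => e
  | .ok none =>
    match asciiAJoin nums with
    | none => pvFmtErr
    | some cs => String.ofList cs

-- ===== PORT B =====
-- B's single loop with character accumulator (acc reversed, joined at the end).
def asciiBLoop : List String → List Char → String
  | [], acc => String.ofList acc.reverse
  | n :: rest, acc =>
    match PySem.Int.ofStr? n with
    | none => pvFmtErr
    | some val =>
      if val < 0 ∨ val > 127 then pvRangeErr
      else asciiBLoop rest (Char.ofNat val.toNat :: acc)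

def ascii_a_texto_alt (ascii_str : String) : String :=
  asciiBLoop (PySem.Str.split₀ ascii_str) []

-- ===== PRECONDITION & SPEC =====
def Spec_ascii_a_texto (ascii_str : String) (out : String) : Prop := out = ascii_a_texto_alt ascii_str
instance (ascii_str : String) (out : String) : Decidable (Spec_ascii_a_texto ascii_str out) := by unfold Spec_ascii_a_texto; infer_instance

-- ===== CLAIM (what is proved, stated in full; the proofs are below) =====
def Claim_equal_ascii_a_texto : Prop := ∀ (ascii_str : String), Dom_ascii_a_texto ascii_str → Spec_ascii_a_texto ascii_str (ascii_a_texto ascii_str)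

-- ===== LEMMAS AND PROOFS =====

-- Loop fusion invariant: B's loop with accumulator `acc` computes A's three-stage result
-- with `acc.reverse` prepended to the successful join.
theorem asciiB_eq_A (nums : List String) : ∀ (acc : List Char),
    asciiBLoop nums acc =
      match asciiAFor nums with
      | .error () => pvFmtErr
      | .ok (some e) => e
      | .ok none =>
        match asciiAJoin nums with
        | none => pvFmtErr
        | some cs => String.ofList (acc.reverse ++ cs) := by
  induction nums with
  | nil => intro acc; simp [asciiBLoop, asciiAFor, asciiAJoin]
  | cons n rest ih =>
    intro acc
    simp only [asciiBLoop, asciiAFor, asciiAJoin]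
    cases h : PySem.Int.ofStr? n with
    | none => rfl
    | some val =>
      by_cases hr : val < 0 ∨ val > 127
      · simp [hr]
      · simp only [if_neg hr]
        rw [ih (Char.ofNat val.toNat :: acc)]
        cases hf : asciiAFor rest with
        | error u => cases u; rfl
        | ok o =>
          cases o with
          | some e => rfl
          | none =>
            cases hj : asciiAJoin rest with
            | none => rfl
            | some cs => simp

-- ===== VERDICT (by name: the statement is the Claim_ definition above) =====
theorem ascii_a_texto_spec : Claim_equal_ascii_a_texto := by
  intro s _
  unfold Spec_ascii_a_texto ascii_a_texto ascii_a_texto_alt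
  rw [asciiB_eq_A (PySem.Str.split₀ s) []]
  cases hf : asciiAFor (PySem.Str.split₀ s) with
  | error u => cases u; simp [hf]
  | ok o =>
    cases o with
    | some e => simp [hf]
    | none => cases hj : asciiAJoin (PySem.Str.split₀ s) <;> simp [hf, hj]
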